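-- pv_equiv track=rewrite | github.com/Carlos-H1307/processamento-de-imagens | histograma_5/funcoes.py | mapear3
-- ===== SOURCE A (Python) =====
-- def mapear3(equalizado, acumulado):
--     mapa2 = {}
--
--     for valor in equalizado:
--         menor = abs( valor - acumulado[0] )
--         menorIndice = 0
--         for j in range( len(acumulado) ):
--             if abs(valor - acumulado[j]) < menor:
--                 menor = abs(valor - acumulado[j])
--                 menorIndice = j
--         mapa2[valor] = menorIndice
--
--     return mapa2
-- ===== SOURCE B (Python) =====
-- def mapear3(equalizado, acumulado):
--     # Nearest-anchor lookup via binary search: build first-occurrence indices,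
--     # sort the distinct anchor values once, then for each value bisect to its
--     # two neighbouring anchors and pick the (distance, first-index)-smallest.
--     first = {}
--     for j, a in enumerate(acumulado):
--         if a not in first:
--             first[a] = j
--     vals = sorted(first)
--
--     def nearest(v):
--         lo, hi = 0, len(vals)
--         while lo < hi:
--             mid = (lo + hi) // 2
--             if vals[mid] < v:
--                 lo = mid + 1
--             else:
--                 hi = mid
--         cands = []
--         if lo < len(vals):
--             cands.append((abs(v - vals[lo]), first[vals[lo]]))
--         if lo > 0:
--             cands.append((abs(v - vals[lo - 1]), first[vals[lo - 1]]))
--         return min(cands)[1]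
--
--     return {v: nearest(v) for v in equalizado}
-- ===== Notes on version B (the rewrite author's own statement) =====
-- stated objective: faster
-- what changed: B replaces A's inner linear scan of acumulado per value with a one-time first-occurrence index plus a sorted distinct-anchor list queried by hand-written binary search; each value's answer is the (distance, first-index)-lexicographic minimum of its two bisection neighbours.
import Mathlib
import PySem

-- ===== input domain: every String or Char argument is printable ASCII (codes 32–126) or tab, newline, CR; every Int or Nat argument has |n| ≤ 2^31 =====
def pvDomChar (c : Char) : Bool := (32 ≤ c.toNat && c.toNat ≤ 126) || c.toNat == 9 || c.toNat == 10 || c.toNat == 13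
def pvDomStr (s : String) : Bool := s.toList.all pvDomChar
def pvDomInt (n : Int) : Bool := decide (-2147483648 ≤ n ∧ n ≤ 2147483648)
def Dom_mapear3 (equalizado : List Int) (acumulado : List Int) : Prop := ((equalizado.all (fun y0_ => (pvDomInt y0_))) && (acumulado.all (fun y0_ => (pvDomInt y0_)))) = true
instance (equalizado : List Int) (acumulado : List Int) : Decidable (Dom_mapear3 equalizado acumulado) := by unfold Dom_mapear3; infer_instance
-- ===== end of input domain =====

-- B is faster: instead of A's full scan of acumulado for every value, it indexes first
-- occurrences once, sorts the distinct anchors once, and binary-searches each value's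
-- two neighbouring anchors; equivalence is about the returned dict.

-- ===== PORT A =====
def mapear3 (equalizado : List Int) (acumulado : List Int) : List (Int × Int) :=
  (equalizado.foldl (fun (mapa2 : PySem.Dict Int Int) valor =>
      let st := (PySem.List.pyRange 0 (PySem.List.len acumulado) 1).foldl
        (fun (s : Int × Int) j =>
          if |valor - PySem.List.pyGetD acumulado j 0| < s.1 then
            (|valor - PySem.List.pyGetD acumulado j 0|, j)
          else s)
        (|valor - PySem.List.pyGetD acumulado 0 0|, 0)
      mapa2.insert valor st.2)
    PySem.Dict.empty).items

-- ===== PORT B =====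
-- 'first': first-occurrence index of each anchor value ('if a not in first: first[a] = j')
def pvFirst (acumulado : List Int) : PySem.Dict Int Int :=
  (PySem.List.enumerate acumulado 0).foldl
    (fun (d : PySem.Dict Int Int) ja => if d.contains ja.2 then d else d.insert ja.2 ja.1)
    PySem.Dict.empty

-- the hand-written 'while lo < hi' binary-search loop of Source B
def pvBS (vals : List Int) (v : Int) (lo hi : Int) : Int :=
  if h : lo < hi then
    let mid := PySem.Int.floordiv (lo + hi) 2
    if PySem.List.pyGetD vals mid 0 < v then pvBS vals v (mid + 1) hi
    else pvBS vals v lo mid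
  else lo
termination_by (hi - lo).toNat
decreasing_by
  · have hb := PySem.Int.floordiv_two_mid_bounds (le_of_lt h)
    omega
  · have hb := PySem.Int.floordiv_two_mid_bounds (le_of_lt h)
    have hlt : PySem.Int.floordiv (lo + hi) 2 < hi :=
      (PySem.Int.floordiv_lt_iff_lt_mul (by omega)).mpr (by omega)
    omega

-- Source B's 'nearest': bisect, collect the ≤2 neighbour candidates, take min(cands)[1]
-- (dict access first[vals[i]] is ported as getD 0: the key is always present)
def pvNearest (vals : List Int) (first : PySem.Dict Int Int) (v : Int) : Int :=
  let lo := pvBS vals v 0 (PySem.List.len vals)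
  let cands : List (Int × Int) :=
    (if lo < PySem.List.len vals then
       [(|v - PySem.List.pyGetD vals lo 0|, first.getD (PySem.List.pyGetD vals lo 0) 0)]
     else []) ++
    (if 0 < lo then
       [(|v - PySem.List.pyGetD vals (lo - 1) 0|, first.getD (PySem.List.pyGetD vals (lo - 1) 0) 0)]
     else [])
  ((PySem.List.min2? cands (fun c => c.1) (fun c => c.2)).getD (0, 0)).2

def mapear3_alt (equalizado : List Int) (acumulado : List Int) : List (Int × Int) :=
  let first := pvFirst acumulado
  let vals := PySem.List.sorted first.keys (fun x => x)
  (equalizado.foldl (fun (m : PySem.Dict Int Int) v => m.insert v (pvNearest vals first v))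
    PySem.Dict.empty).items

-- ===== PRECONDITION & SPEC =====
-- Pre_ excludes exactly the inputs where Python A raises IndexError (acumulado[0] with
-- equalizado nonempty and acumulado empty); B raises there too (min of an empty list).
def Pre_mapear3 (equalizado : List Int) (acumulado : List Int) : Prop :=
  equalizado = [] ∨ acumulado ≠ []
instance (equalizado : List Int) (acumulado : List Int) : Decidable (Pre_mapear3 equalizado acumulado) := by unfold Pre_mapear3; infer_instance
def pvWitness_mapear3 : List Int × List Int := ([1, 4, 1], [0, 3, 5])

def Spec_mapear3 (equalizado : List Int) (acumulado : List Int) (out : List (Int × Int)) : Prop := out = mapear3_alt equalizado acumulado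
instance (equalizado : List Int) (acumulado : List Int) (out : List (Int × Int)) : Decidable (Spec_mapear3 equalizado acumulado out) := by unfold Spec_mapear3; infer_instance

-- ===== CLAIM (what is proved, stated in full; the proofs are below) =====
def Claim_equal_mapear3 : Prop := ∀ (equalizado : List Int) (acumulado : List Int), Dom_mapear3 equalizado acumulado → Pre_mapear3 equalizado acumulado → Spec_mapear3 equalizado acumulado (mapear3 equalizado acumulado)

-- ===== LEMMAS AND PROOFS =====

-- the per-value scan A performs, as a fold over enumerate(acumulado)
def pvScan (v : Int) (xs : List (Int × Int)) (s0 : Int × Int) : Int × Int :=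
  xs.foldl (fun s p => if |v - p.2| < s.1 then (|v - p.2|, p.1) else s) s0

-- A's inner index loop equals the enumerate fold
theorem pvBridge (v : Int) (ac : List Int) (s0 : Int × Int) :
    (PySem.List.pyRange 0 (PySem.List.len ac) 1).foldl
      (fun (s : Int × Int) j =>
        if |v - PySem.List.pyGetD ac j 0| < s.1 then (|v - PySem.List.pyGetD ac j 0|, j) else s)
      s0 = pvScan v (PySem.List.enumerate ac 0) s0 := by
  rw [pvScan, PySem.List.enumerate_eq_map_pyRange ac 0, List.foldl_map]

-- a foldl of key-determined inserts from the empty dict has items (dedup l).map (v, f v)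
theorem pvItemsA (f : Int → Int) (l : List Int) :
    (l.foldl (fun (m : PySem.Dict Int Int) v => m.insert v (f v)) PySem.Dict.empty).items
      = (PySem.List.dedup l).map (fun v => (v, f v)) := by
  induction l using List.reverseRecOn with
  | nil => rfl
  | append_singleton l x ih =>
    rw [List.foldl_append, List.foldl_cons, List.foldl_nil]
    have hkeys : (l.foldl (fun (m : PySem.Dict Int Int) v => m.insert v (f v)) PySem.Dict.empty).keys
        = PySem.List.dedup l := by
      simp only [PySem.Dict.keys, ih, List.map_map]
      exact List.map_id _ ▸ rfl
    by_cases hx : x ∈ PySem.List.dedup l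
    · have hc : (l.foldl (fun (m : PySem.Dict Int Int) v => m.insert v (f v)) PySem.Dict.empty).contains x = true := by
        rw [PySem.Dict.contains_iff_mem_keys, hkeys]; exact hx
      rw [PySem.Dict.items_insert_of_contains _ _ hc, ih]
      have hxl : x ∈ PySem.Set.ofList l := by rw [← PySem.List.dedup_eq_ofList]; exact hx
      have hd : PySem.List.dedup (l ++ [x]) = PySem.List.dedup l := by
        rw [PySem.List.dedup_eq_ofList, PySem.List.dedup_eq_ofList,
          PySem.Set.ofList_append_singleton]
        simp [PySem.Set.add, PySem.Set.contains, hxl]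
      rw [hd, List.map_map]
      apply List.map_congr_left
      intro v hv
      by_cases hvx : v = x <;> simp [hvx]
    · have hc : (l.foldl (fun (m : PySem.Dict Int Int) v => m.insert v (f v)) PySem.Dict.empty).contains x = false := by
        rw [Bool.eq_false_iff, Ne, PySem.Dict.contains_iff_mem_keys, hkeys]; exact hx
      rw [PySem.Dict.items_insert_of_not_contains _ _ hc, ih]
      have hxl : x ∉ PySem.Set.ofList l := by rw [← PySem.List.dedup_eq_ofList]; exact hx
      have hd : PySem.List.dedup (l ++ [x]) = PySem.List.dedup l ++ [x] := by
        rw [PySem.List.dedup_eq_ofList, PySem.List.dedup_eq_ofList,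
          PySem.Set.ofList_append_singleton]
        simp [PySem.Set.add, PySem.Set.contains, hxl]
      rw [hd, List.map_append]; rfl

-- what A's scan computes for one value: the pair (min distance, FIRST index attaining it)
def pvGood (v : Int) (ac : List Int) (r : Int × Int) : Prop :=
  (∃ (k : Nat) (h : k < ac.length), r = (|v - ac[k]|, (k : Int))) ∧
  (∀ (k : Nat) (h : k < ac.length), r.1 ≤ |v - ac[k]|) ∧
  (∀ (k : Nat) (h : k < ac.length), |v - ac[k]| = r.1 → r.2 ≤ (k : Int))

theorem pvGood_unique {v : Int} {ac : List Int} {r r' : Int × Int}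
    (hr : pvGood v ac r) (hr' : pvGood v ac r') : r = r' := by
  obtain ⟨⟨k, hk, hrk⟩, hmin, hfst⟩ := hr
  obtain ⟨⟨k', hk', hrk'⟩, hmin', hfst'⟩ := hr'
  have ek : r.1 = |v - ac[k]| := by rw [hrk]
  have ek' : r'.1 = |v - ac[k']| := by rw [hrk']
  have h1 : r.1 = r'.1 := by
    have a1 : r.1 ≤ |v - ac[k']| := hmin k' hk'
    have a2 : r'.1 ≤ |v - ac[k]| := hmin' k hk
    omega
  have h2 : r.2 = r'.2 := by
    have a1 : r'.2 ≤ (k : Int) := hfst' k hk (by omega)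
    have a2 : r.2 ≤ (k' : Int) := hfst k' hk' (by omega)
    have b1 : r.2 = (k : Int) := by rw [hrk]
    have b2 : r'.2 = (k' : Int) := by rw [hrk']
    omega
  exact Prod.ext_iff.mpr ⟨h1, h2⟩

theorem pvA_good (v : Int) (ac : List Int) (hac : ac ≠ []) :
    pvGood v ac (pvScan v (PySem.List.enumerate ac 0) (|v - PySem.List.pyGetD ac 0 0|, 0)) := by
  induction ac using List.reverseRecOn with
  | nil => exact absurd rfl hac
  | append_singleton l x ih =>
    by_cases hl : l = []
    · subst hl
      refine ⟨⟨0, by simp, by simp [pvScan, PySem.List.enumerate, PySem.List.pyGetD_zero]⟩, ?_, ?_⟩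
      · intro k hk
        have hk0 : k = 0 := by simpa using hk
        subst hk0
        simp [pvScan, PySem.List.enumerate, PySem.List.pyGetD_zero]
      · intro k hk _
        have hk0 : k = 0 := by simpa using hk
        subst hk0
        simp [pvScan, PySem.List.enumerate, PySem.List.pyGetD_zero]
    · have ihl := ih hl
      have hget0 : PySem.List.pyGetD (l ++ [x]) 0 0 = PySem.List.pyGetD l 0 0 := by
        cases l with
        | nil => exact absurd rfl hl
        | cons a t => simp [PySem.List.pyGetD_zero_cons]
      have hsplit : pvScan v (PySem.List.enumerate (l ++ [x]) 0) (|v - PySem.List.pyGetD (l ++ [x]) 0 0|, 0)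
          = (fun s (p : Int × Int) => if |v - p.2| < s.1 then (|v - p.2|, p.1) else s)
              (pvScan v (PySem.List.enumerate l 0) (|v - PySem.List.pyGetD l 0 0|, 0)) ((l.length : Int), x) := by
        rw [hget0, pvScan, PySem.List.enumerate_append, List.foldl_append]
        simp [pvScan]
      set r := pvScan v (PySem.List.enumerate l 0) (|v - PySem.List.pyGetD l 0 0|, 0) with hr
      obtain ⟨⟨k0, hk0, hrk0⟩, hmin, hfst⟩ := ihl
      rw [hsplit]
      show pvGood v (l ++ [x]) (if |v - x| < r.1 then (|v - x|, (l.length : Int)) else r)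
      by_cases hx : |v - x| < r.1
      · rw [if_pos hx]
        refine ⟨⟨l.length, by simp, by simp⟩, ?_, ?_⟩
        · intro k hk
          simp only [List.length_append, List.length_singleton] at hk
          by_cases hkl : k < l.length
          · rw [List.getElem_append_left hkl]
            have := hmin k hkl
            simp only []
            omega
          · have hke : k = l.length := by omega
            subst hke
            simp
        · intro k hk heq
          simp only [List.length_append, List.length_singleton] at hk
          by_cases hkl : k < l.length
          · exfalso
            rw [List.getElem_append_left hkl] at heq
            have := hmin k hkl
            simp only [] at heq
            omega
          · have hke : k = l.length := by omega
            subst hke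
            simp
      · rw [if_neg hx]
        refine ⟨⟨k0, by simp only [List.length_append, List.length_singleton]; omega,
            by rw [List.getElem_append_left hk0]; exact hrk0⟩, ?_, ?_⟩
        · intro k hk
          simp only [List.length_append, List.length_singleton] at hk
          by_cases hkl : k < l.length
          · rw [List.getElem_append_left hkl]; exact hmin k hkl
          · have hke : k = l.length := by omega
            subst hke
            rw [List.getElem_concat_length rfl]
            omega
        · intro k hk heq
          simp only [List.length_append, List.length_singleton] at hk
          by_cases hkl : k < l.length
          · rw [List.getElem_append_left hkl] at heq
            exact hfst k hkl heq
          · have hke : k = l.length := by omega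
            subst hke
            have : r.2 ≤ (k0 : Int) := by rw [hrk0]
            omega

-- the first-occurrence dict: items are (distinct anchors, their first index)
theorem pvFitems (ac : List Int) :
    (pvFirst ac).items
      = (PySem.List.dedup ac).map (fun w => (w, (((PySem.List.index? ac w).getD 0 : Nat) : Int))) := by
  induction ac using List.reverseRecOn with
  | nil => rfl
  | append_singleton l x ih =>
    have hstep : pvFirst (l ++ [x])
        = (fun (d : PySem.Dict Int Int) (ja : Int × Int) =>
            if d.contains ja.2 then d else d.insert ja.2 ja.1) (pvFirst l) ((l.length : Int), x) := by
      rw [pvFirst, pvFirst, PySem.List.enumerate_append, List.foldl_append]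
      simp [PySem.List.enumerate]
    have hkeys : (pvFirst l).keys = PySem.List.dedup l := by
      simp only [PySem.Dict.keys, ih, List.map_map]
      exact List.map_id _ ▸ rfl
    by_cases hx : x ∈ l
    · have hc : (pvFirst l).contains x = true := by
        rw [PySem.Dict.contains_iff_mem_keys, hkeys, PySem.List.mem_dedup _ _]; exact hx
      rw [hstep]; simp only [hc, if_true]
      rw [ih]
      have hd : PySem.List.dedup (l ++ [x]) = PySem.List.dedup l := by
        rw [PySem.List.dedup_eq_ofList, PySem.List.dedup_eq_ofList,
          PySem.Set.ofList_append_singleton]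
        have hxl : x ∈ PySem.Set.ofList l := by
          rw [← PySem.List.dedup_eq_ofList, PySem.List.mem_dedup _ _]; exact hx
        simp [PySem.Set.add, PySem.Set.contains, hxl]
      rw [hd]
      apply List.map_congr_left
      intro w hw
      rw [PySem.List.index?_append_of_mem _ ((PySem.List.mem_dedup _ _).mp hw)]
    · have hc : (pvFirst l).contains x = false := by
        rw [Bool.eq_false_iff, Ne, PySem.Dict.contains_iff_mem_keys, hkeys, PySem.List.mem_dedup _ _]
        exact hx
      rw [hstep]; simp only [hc, if_false, Bool.false_eq_true]
      rw [PySem.Dict.items_insert_of_not_contains _ _ hc, ih]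
      have hd : PySem.List.dedup (l ++ [x]) = PySem.List.dedup l ++ [x] := by
        rw [PySem.List.dedup_eq_ofList, PySem.List.dedup_eq_ofList,
          PySem.Set.ofList_append_singleton]
        have hxl : x ∉ PySem.Set.ofList l := by
          rw [← PySem.List.dedup_eq_ofList, PySem.List.mem_dedup _ _]; exact hx
        simp [PySem.Set.add, PySem.Set.contains, hxl]
      rw [hd, List.map_append]
      congr 1
      · apply List.map_congr_left
        intro w hw
        rw [PySem.List.index?_append_of_mem _ ((PySem.List.mem_dedup _ _).mp hw)]
      · simp only [List.map_singleton]
        rw [PySem.List.index?_append_singleton_self l x hx, Option.getD_some]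

theorem pvFkeys (ac : List Int) : (pvFirst ac).keys = PySem.List.dedup ac := by
  simp only [PySem.Dict.keys, pvFitems, List.map_map]
  exact List.map_id _ ▸ rfl

-- first-occurrence index: in range, hits w, and is minimal
theorem pvIdx_spec (ac : List Int) (w : Int) (hw : w ∈ ac) :
    ∃ h : (PySem.List.index? ac w).getD 0 < ac.length,
      ac[(PySem.List.index? ac w).getD 0] = w ∧
      ∀ (j : Nat) (hj : j < ac.length), ac[j] = w → (PySem.List.index? ac w).getD 0 ≤ j := by
  obtain ⟨k, hk⟩ := Option.isSome_iff_exists.mp ((PySem.List.index?_isSome_iff _ _).mpr hw)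
  obtain ⟨hlt, hget, hmin⟩ := PySem.List.getElem_of_index?_eq_some hk
  rw [hk, Option.getD_some]
  refine ⟨hlt, hget, ?_⟩
  intro j hj hgj
  by_contra hc
  exact hmin j (by omega) hgj

theorem pvFgetD (ac : List Int) (w : Int) (hw : w ∈ ac) :
    (pvFirst ac).getD w 0 = (((PySem.List.index? ac w).getD 0 : Nat) : Int) := by
  apply PySem.Dict.getD_of_mem_items
  · rw [pvFitems]
    exact List.mem_map.mpr ⟨w, (PySem.List.mem_dedup _ _).mpr hw, rfl⟩
  · rw [pvFkeys]
    exact PySem.List.nodup_dedup ac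

theorem pvBS_step_lt (vals : List Int) (v lo hi : Int) (h : lo < hi)
    (hlt : PySem.List.pyGetD vals (PySem.Int.floordiv (lo + hi) 2) 0 < v) :
    pvBS vals v lo hi = pvBS vals v (PySem.Int.floordiv (lo + hi) 2 + 1) hi := by
  rw [pvBS, dif_pos h]
  show (if PySem.List.pyGetD vals (PySem.Int.floordiv (lo + hi) 2) 0 < v then
      pvBS vals v (PySem.Int.floordiv (lo + hi) 2 + 1) hi
    else pvBS vals v lo (PySem.Int.floordiv (lo + hi) 2)) = _
  rw [if_pos hlt]

theorem pvBS_step_ge (vals : List Int) (v lo hi : Int) (h : lo < hi)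
    (hge : ¬ PySem.List.pyGetD vals (PySem.Int.floordiv (lo + hi) 2) 0 < v) :
    pvBS vals v lo hi = pvBS vals v lo (PySem.Int.floordiv (lo + hi) 2) := by
  rw [pvBS, dif_pos h]
  show (if PySem.List.pyGetD vals (PySem.Int.floordiv (lo + hi) 2) 0 < v then
      pvBS vals v (PySem.Int.floordiv (lo + hi) 2 + 1) hi
    else pvBS vals v lo (PySem.Int.floordiv (lo + hi) 2)) = _
  rw [if_neg hge]

theorem pvBS_stop (vals : List Int) (v lo hi : Int) (h : ¬ lo < hi) :
    pvBS vals v lo hi = lo := by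
  rw [pvBS, dif_neg h]

-- binary-search invariant: the returned lo splits vals into (< v) and (≥ v)
theorem pvBS_spec (vals : List Int) (v : Int)
    (hmono : ∀ (i j : Nat) (hij : i ≤ j) (hj : j < vals.length), vals[i] ≤ vals[j]) :
    ∀ (lo hi : Int), 0 ≤ lo → lo ≤ hi → hi ≤ vals.length →
    (∀ (i : Nat) (hi_ : i < vals.length), (i : Int) < lo → vals[i] < v) →
    (∀ (i : Nat) (hi_ : i < vals.length), hi ≤ (i : Int) → v ≤ vals[i]) →
    0 ≤ pvBS vals v lo hi ∧ pvBS vals v lo hi ≤ vals.length ∧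
    (∀ (i : Nat) (hi_ : i < vals.length), (i : Int) < pvBS vals v lo hi → vals[i] < v) ∧
    (∀ (i : Nat) (hi_ : i < vals.length), pvBS vals v lo hi ≤ (i : Int) → v ≤ vals[i]) := by
  intro lo hi
  induction lo, hi using pvBS.induct vals v with
  | case1 lo hi h mid hlt ih =>
    intro h0 hlh hhi hbelow habove
    have hb := PySem.Int.floordiv_two_mid_bounds (le_of_lt h)
    have hmlt : PySem.Int.floordiv (lo + hi) 2 < hi :=
      (PySem.Int.floordiv_lt_iff_lt_mul (by omega)).mpr (by omega)
    rw [pvBS_step_lt vals v lo hi h hlt]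
    have hmr : (PySem.Int.floordiv (lo + hi) 2).toNat < vals.length := by omega
    have hmv : vals[(PySem.Int.floordiv (lo + hi) 2).toNat] < v := by
      have := PySem.List.pyGetD_eq_getElem (xs := vals)
        (i := PySem.Int.floordiv (lo + hi) 2) (d := 0) (by omega) (by omega)
      rw [this] at hlt
      exact hlt
    apply ih (by omega) (by omega) hhi
    · intro i hi_ hil
      by_cases hc : (i : Int) < lo
      · exact hbelow i hi_ hc
      · have := hmono i (PySem.Int.floordiv (lo + hi) 2).toNat (by omega) hmr
        omega
    · exact habove
  | case2 lo hi h mid hge ih =>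
    intro h0 hlh hhi hbelow habove
    have hb := PySem.Int.floordiv_two_mid_bounds (le_of_lt h)
    have hmlt : PySem.Int.floordiv (lo + hi) 2 < hi :=
      (PySem.Int.floordiv_lt_iff_lt_mul (by omega)).mpr (by omega)
    rw [pvBS_step_ge vals v lo hi h hge]
    have hmr : (PySem.Int.floordiv (lo + hi) 2).toNat < vals.length := by omega
    have hmv : v ≤ vals[(PySem.Int.floordiv (lo + hi) 2).toNat] := by
      have := PySem.List.pyGetD_eq_getElem (xs := vals)
        (i := PySem.Int.floordiv (lo + hi) 2) (d := 0) (by omega) (by omega)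
      rw [this] at hge
      omega
    apply ih h0 (by omega) (by omega) hbelow
    intro i hi_ hmi
    have := hmono (PySem.Int.floordiv (lo + hi) 2).toNat i (by omega) hi_
    omega
  | case3 lo hi h =>
    intro h0 hlh hhi hbelow habove
    rw [pvBS_stop vals v lo hi h]
    exact ⟨h0, by omega, fun i hi_ hil => hbelow i hi_ hil,
      fun i hi_ hli => habove i hi_ (by omega)⟩

-- min(cands) for the one- and two-candidate lists B builds
theorem pvMin2_singleton (a : Int × Int) :
    (PySem.List.min2? [a] (fun c => c.1) (fun c => c.2)).getD (0, 0) = a := by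
  simp [PySem.List.min2?]

theorem pvMin2_pair (a b : Int × Int) :
    (PySem.List.min2? [a, b] (fun c => c.1) (fun c => c.2)).getD (0, 0)
      = if b.1 < a.1 ∨ (¬ a.1 < b.1 ∧ b.2 < a.2) then b else a := by
  simp only [PySem.List.min2?, List.foldl_cons, List.foldl_nil]
  by_cases h : b.1 < a.1 ∨ (¬ a.1 < b.1 ∧ b.2 < a.2)
  · rw [if_pos h]
    have hb : (decide (b.1 < a.1) || (!decide (a.1 < b.1) && decide (b.2 < a.2))) = true := by
      rcases h with h | ⟨h1, h2⟩
      · simp [h]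
      · simp [h1, h2]
    simp [hb]
  · rw [if_neg h]
    have hb : (decide (b.1 < a.1) || (!decide (a.1 < b.1) && decide (b.2 < a.2))) = false := by
      by_cases h1 : b.1 < a.1
      · exact absurd (Or.inl h1) h
      · by_cases h2 : a.1 < b.1
        · simp [h1, h2]
        · by_cases h3 : b.2 < a.2
          · exact absurd (Or.inr ⟨h2, h3⟩) h
          · simp [h1, h2, h3]
    simp [hb]

-- pvGood from a chosen anchor value and its first-occurrence index
theorem pvGood_of (v : Int) (ac : List Int) (w : Int) (hw : w ∈ ac)
    (hmin : ∀ (k : Nat) (h : k < ac.length), |v - w| ≤ |v - ac[k]|)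
    (hfst : ∀ (k : Nat) (h : k < ac.length), |v - ac[k]| = |v - w| →
      ((((PySem.List.index? ac w).getD 0 : Nat) : Int)) ≤ (k : Int)) :
    pvGood v ac (|v - w|, (((PySem.List.index? ac w).getD 0 : Nat) : Int)) := by
  obtain ⟨hlt, hget, _⟩ := pvIdx_spec ac w hw
  refine ⟨⟨(PySem.List.index? ac w).getD 0, hlt, by rw [hget]⟩, ?_, ?_⟩
  · intro k h; exact hmin k h
  · intro k h he; exact hfst k h he

-- the candidate chosen by B's bisection is exactly A's (min distance, first index) pair
theorem pvPointwise (ac : List Int) (hac : ac ≠ []) (v : Int) :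
    (pvScan v (PySem.List.enumerate ac 0) (|v - PySem.List.pyGetD ac 0 0|, 0)).2
      = pvNearest (PySem.List.sorted (pvFirst ac).keys (fun x => x)) (pvFirst ac) v := by
  have hA := pvA_good v ac hac
  set vals := PySem.List.sorted (pvFirst ac).keys (fun x => x) with hvals
  have hpw : vals.Pairwise (· < ·) := by
    rw [hvals, pvFkeys, PySem.List.dedup_eq_ofList]
    exact PySem.List.sorted_ofList_pairwise_lt ac
  have hstrict : ∀ (i j : Nat) (hij : i < j) (hj : j < vals.length), vals[i] < vals[j] := by
    intro i j hij hj
    exact List.pairwise_iff_getElem.mp hpw i j (Nat.lt_trans hij hj) hj hij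
  have hmono : ∀ (i j : Nat) (hij : i ≤ j) (hj : j < vals.length), vals[i] ≤ vals[j] := by
    intro i j hij hj
    rcases Nat.lt_or_eq_of_le hij with h | h
    · exact le_of_lt (hstrict i j h hj)
    · subst h; exact le_refl _
  have hmem : ∀ w : Int, w ∈ vals ↔ w ∈ ac := by
    intro w
    rw [hvals, PySem.List.mem_sorted, pvFkeys, PySem.List.mem_dedup]
  have hnil : 0 < vals.length := by
    obtain ⟨a, ha⟩ := List.exists_mem_of_ne_nil ac hac
    exact List.length_pos_of_mem ((hmem a).mpr ha)
  obtain ⟨h0, hL, hbel, habv⟩ := pvBS_spec vals v hmono 0 (vals.length : Int) le_rfl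
    (by omega) (by omega)
    (fun i hi_ h => absurd h (by omega)) (fun i hi_ h => absurd h (by omega))
  set lo := pvBS vals v 0 (vals.length : Int) with hlo
  have hcast : ((lo.toNat : Int)) = lo := Int.toNat_of_nonneg h0
  -- every anchor appears in vals
  have hwk : ∀ (k : Nat) (hk : k < ac.length), ∃ (i : Nat) (hi : i < vals.length),
      vals[i] = ac[k] := by
    intro k hk
    exact List.mem_iff_getElem.mp ((hmem _).mpr (List.getElem_mem hk))
  rw [pvNearest, PySem.List.len_eq, ← hlo]
  by_cases hlt : lo < (vals.length : Int)
  · have hsn : lo.toNat < vals.length := by omega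
    have hsget : PySem.List.pyGetD vals lo 0 = vals[lo.toNat] :=
      PySem.List.pyGetD_eq_getElem (xs := vals) (i := lo) (d := 0) h0 (by omega)
    have hsmem : vals[lo.toNat] ∈ ac := (hmem _).mp (List.getElem_mem hsn)
    have hvle : v ≤ vals[lo.toNat] := habv lo.toNat hsn (by omega)
    obtain ⟨hsi, hsg, hsmin⟩ := pvIdx_spec ac (vals[lo.toNat]) hsmem
    by_cases hpos : 0 < lo
    · -- middle: two candidates
      have hpn : lo.toNat - 1 < vals.length := by omega
      have hpget : PySem.List.pyGetD vals (lo - 1) 0 = vals[lo.toNat - 1] := by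
        have := PySem.List.pyGetD_eq_getElem (xs := vals) (i := lo - 1) (d := 0)
          (by omega) (by omega)
        rw [this]
        congr 1
        omega
      have hpmem : vals[lo.toNat - 1] ∈ ac := (hmem _).mp (List.getElem_mem hpn)
      have hplt : vals[lo.toNat - 1] < v := hbel (lo.toNat - 1) hpn (by omega)
      obtain ⟨hpi, hpg, hpmin⟩ := pvIdx_spec ac (vals[lo.toNat - 1]) hpmem
      rw [if_pos hlt, if_pos hpos, hsget, hpget,
        pvFgetD ac _ hsmem, pvFgetD ac _ hpmem]
      simp only [List.cons_append, List.nil_append]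
      rw [pvMin2_pair]
      set s := vals[lo.toNat] with hs
      set p := vals[lo.toNat - 1] with hp
      set js := (((PySem.List.index? ac s).getD 0 : Nat) : Int) with hjs
      set jp := (((PySem.List.index? ac p).getD 0 : Nat) : Int) with hjp
      have hds : |v - s| = s - v := by rw [abs_of_nonpos (by omega)]; ring
      have hdp : |v - p| = v - p := abs_of_nonneg (by omega)
      -- distances of arbitrary anchors
      have hbound : ∀ (k : Nat) (hk : k < ac.length),
          (v ≤ ac[k] ∧ s ≤ ac[k]) ∨ (ac[k] < v ∧ ac[k] ≤ p) := by
        intro k hk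
        obtain ⟨i, hi, hie⟩ := hwk k hk
        by_cases hil : i < lo.toNat
        · right
          have h1 : vals[i] < v := hbel i hi (by omega)
          have h2 : vals[i] ≤ p := hmono i (lo.toNat - 1) (by omega) hpn
          omega
        · left
          have h1 : v ≤ vals[i] := habv i hi (by omega)
          have h2 : s ≤ vals[i] := hmono lo.toNat i (by omega) hi
          omega
      split_ifs with hcond
      · -- pred chosen
        simp only []
        have hdple : v - p ≤ s - v := by
          rcases hcond with h | ⟨h1, h2⟩
          · simp only [hdp, hds] at h; omega
          · simp only [hdp, hds] at h1; omega
        have hGood : pvGood v ac (|v - p|, jp) := by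
          apply pvGood_of v ac p hpmem
          · intro k hk
            rcases hbound k hk with ⟨h1, h2⟩ | ⟨h1, h2⟩
            · rw [hdp, abs_of_nonpos (by omega)]; omega
            · rw [hdp, abs_of_nonneg (by omega)]; omega
          · intro k hk he
            rcases hbound k hk with ⟨h1, h2⟩ | ⟨h1, h2⟩
            · -- anchor on the right at equal distance: it must be s, and jp < js ≤ k
              rw [abs_of_nonpos (by omega), hdp] at he
              have hks : ac[k] = s := by omega
              have htie : ¬ (v - p < s - v) := by omega
              have hjps : jp < js := by
                rcases hcond with h | ⟨h1', h2'⟩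
                · exfalso; simp only [hdp, hds] at h; omega
                · simpa [hjp, hjs] using h2'
              have := hsmin k hk hks
              omega
            · rw [abs_of_nonneg (by omega), hdp] at he
              have hkp : ac[k] = p := by omega
              have := hpmin k hk hkp
              omega
        rw [pvGood_unique hA hGood]
      · -- succ chosen
        simp only []
        push_neg at hcond
        have hdsle : s - v ≤ v - p := by
          have h1 := hcond.1
          simp only [hdp, hds] at h1
          omega
        have hGood : pvGood v ac (|v - s|, js) := by
          apply pvGood_of v ac s hsmem
          · intro k hk
            rcases hbound k hk with ⟨h1, h2⟩ | ⟨h1, h2⟩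
            · rw [hds, abs_of_nonpos (by omega)]; omega
            · rw [hds, abs_of_nonneg (by omega)]; omega
          · intro k hk he
            rcases hbound k hk with ⟨h1, h2⟩ | ⟨h1, h2⟩
            · rw [abs_of_nonpos (by omega), hds] at he
              have hks : ac[k] = s := by omega
              have := hsmin k hk hks
              omega
            · -- anchor on the left at equal distance: it must be p, and js ≤ jp ≤ k
              rw [abs_of_nonneg (by omega), hds] at he
              have hkp : ac[k] = p := by omega
              have htie : ¬ (v - p < s - v) := by omega
              have hjsp : js ≤ jp := by
                have h2 := hcond.2 (by simp only [hdp, hds]; omega)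
                simpa [hjp, hjs] using h2
              have := hpmin k hk hkp
              omega
        rw [pvGood_unique hA hGood]
    · -- lo = 0: only the successor candidate
      have hlz : lo = 0 := by omega
      rw [if_pos hlt, if_neg hpos, hsget, pvFgetD ac _ hsmem]
      simp only [List.append_nil]
      rw [pvMin2_singleton]
      set s := vals[lo.toNat] with hs
      set js := (((PySem.List.index? ac s).getD 0 : Nat) : Int) with hjs
      have hds : |v - s| = s - v := by rw [abs_of_nonpos (by omega)]; ring
      have hbound : ∀ (k : Nat) (hk : k < ac.length), v ≤ ac[k] ∧ s ≤ ac[k] := by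
        intro k hk
        obtain ⟨i, hi, hie⟩ := hwk k hk
        have h1 : v ≤ vals[i] := habv i hi (by omega)
        have h2 : s ≤ vals[i] := hmono lo.toNat i (by omega) hi
        omega
      have hGood : pvGood v ac (|v - s|, js) := by
        apply pvGood_of v ac s hsmem
        · intro k hk
          obtain ⟨h1, h2⟩ := hbound k hk
          rw [hds, abs_of_nonpos (by omega)]; omega
        · intro k hk he
          obtain ⟨h1, h2⟩ := hbound k hk
          rw [abs_of_nonpos (by omega), hds] at he
          have hks : ac[k] = s := by omega
          have := hsmin k hk hks
          omega
      rw [pvGood_unique hA hGood]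
  · -- lo = length: only the predecessor candidate
    have hle : lo = (vals.length : Int) := by omega
    have hpos : 0 < lo := by omega
    have hpn : lo.toNat - 1 < vals.length := by omega
    have hpget : PySem.List.pyGetD vals (lo - 1) 0 = vals[lo.toNat - 1] := by
      have := PySem.List.pyGetD_eq_getElem (xs := vals) (i := lo - 1) (d := 0)
        (by omega) (by omega)
      rw [this]
      congr 1
      omega
    have hpmem : vals[lo.toNat - 1] ∈ ac := (hmem _).mp (List.getElem_mem hpn)
    have hplt : vals[lo.toNat - 1] < v := hbel (lo.toNat - 1) hpn (by omega)
    obtain ⟨hpi, hpg, hpmin⟩ := pvIdx_spec ac (vals[lo.toNat - 1]) hpmem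
    rw [if_neg hlt, if_pos hpos, hpget, pvFgetD ac _ hpmem]
    simp only [List.nil_append]
    rw [pvMin2_singleton]
    set p := vals[lo.toNat - 1] with hp
    set jp := (((PySem.List.index? ac p).getD 0 : Nat) : Int) with hjp
    have hdp : |v - p| = v - p := abs_of_nonneg (by omega)
    have hbound : ∀ (k : Nat) (hk : k < ac.length), ac[k] < v ∧ ac[k] ≤ p := by
      intro k hk
      obtain ⟨i, hi, hie⟩ := hwk k hk
      have h1 : vals[i] < v := hbel i hi (by omega)
      have h2 : vals[i] ≤ p := hmono i (lo.toNat - 1) (by omega) hpn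
      omega
    have hGood : pvGood v ac (|v - p|, jp) := by
      apply pvGood_of v ac p hpmem
      · intro k hk
        obtain ⟨h1, h2⟩ := hbound k hk
        rw [hdp, abs_of_nonneg (by omega)]; omega
      · intro k hk he
        obtain ⟨h1, h2⟩ := hbound k hk
        rw [abs_of_nonneg (by omega), hdp] at he
        have hkp : ac[k] = p := by omega
        have := hpmin k hk hkp
        omega
    rw [pvGood_unique hA hGood]

-- ===== VERDICT (by name: the statement is the Claim_ definition above) =====
theorem mapear3_spec : Claim_equal_mapear3 := by
  intro equalizado acumulado _ hpre
  unfold Spec_mapear3 mapear3 mapear3_alt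
  simp only [pvBridge]
  rw [pvItemsA (fun v => (pvScan v (PySem.List.enumerate acumulado 0)
        (|v - PySem.List.pyGetD acumulado 0 0|, 0)).2) equalizado]
  rw [pvItemsA (fun v => pvNearest (PySem.List.sorted (pvFirst acumulado).keys (fun x => x))
        (pvFirst acumulado) v) equalizado]
  apply List.map_congr_left
  intro v hv
  have hac : acumulado ≠ [] := by
    rcases hpre with he | hne
    · subst he; simp at hv
    · exact hne
  rw [pvPointwise acumulado hac v]
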